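-- pv_equiv track=rewrite | github.com/tdulcet/AutoPrimeNet | scripts/validate_gpuowl_log_guards.py | need_ap1_search
-- ===== SOURCE A (Python) =====
-- def need_ap1_search(line: str) -> bool:
-- 	i = line.find("P1 ")
-- 	if i < 1 or not line[i - 1].isdigit():
-- 		return False
-- 	j = i - 1
-- 	while j >= 0 and line[j].isdigit():
-- 		j -= 1
-- 	return i - 1 - j >= 6
-- ===== SOURCE B (Python) =====
-- def need_ap1_search(line: str) -> bool:
-- 	run = 0
-- 	for k in range(len(line)):
-- 		if line.startswith("P1 ", k):
-- 			return run >= 6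
-- 		run = run + 1 if line[k].isdigit() else 0
-- 	return False
-- ===== Notes on version B (the rewrite author's own statement) =====
-- stated objective: alternative
-- what changed: Instead of find() plus a backward digit-counting walk from the match, B makes a single forward left-to-right scan that maintains a running count of consecutive digits and answers at the first position where 'P1 ' starts (the i>=1 and preceding-digit guards become unnecessary: a run of >=6 digits implies both).
import Mathlib
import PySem

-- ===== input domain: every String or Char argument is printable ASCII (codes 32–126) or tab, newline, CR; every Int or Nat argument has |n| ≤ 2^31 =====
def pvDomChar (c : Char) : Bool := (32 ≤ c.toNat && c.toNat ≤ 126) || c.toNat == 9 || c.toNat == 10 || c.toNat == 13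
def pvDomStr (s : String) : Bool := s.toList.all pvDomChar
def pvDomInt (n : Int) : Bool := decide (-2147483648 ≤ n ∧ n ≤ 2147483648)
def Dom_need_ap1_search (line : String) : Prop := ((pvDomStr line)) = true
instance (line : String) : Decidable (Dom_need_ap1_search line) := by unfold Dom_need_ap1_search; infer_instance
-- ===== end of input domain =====

-- B replaces A's find()-then-backward-digit-walk by a single forward scan keeping a
-- running count of consecutive digits, answered at the first "P1 " position; same cost.


-- ===== PORT A =====
-- A's backward while loop: j starts at i-1, steps down while j >= 0 and line[j] is a digit.
-- (the 'none' branch of pyGet? never fires on A's actual calls: there 0 ≤ j < |cs|)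
def aLoop (cs : List Char) (j : Int) : Int :=
  if h : 0 ≤ j then
    match PySem.List.pyGet? cs j with
    | some c => if PySem.Chars.isdigit c then aLoop cs (j - 1) else j
    | none => j
  else j
termination_by (j + 1).toNat
decreasing_by omega

def need_ap1_search (line : String) : Bool :=
  let cs := line.toList
  let i := PySem.Chars.find cs "P1 ".toList
  if i < 1 then false
  else
    match PySem.List.pyGet? cs (i - 1) with
    | none => false  -- unreachable on A's calls (1 ≤ i < |cs|); Python would raise only if out of range
    | some c =>
      if !(PySem.Chars.isdigit c) then false
      else decide (6 ≤ i - 1 - aLoop cs (i - 1))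

-- ===== PORT B =====
-- B's for-loop over k in range(len(line)) with the running digit count `run`;
-- Python's line.startswith("P1 ", k) (0 ≤ k ≤ len) is exactly: "P1 " a prefix of line[k:].
def bLoop (cs : List Char) (k : Nat) (run : Nat) : Bool :=
  if h : k < cs.length then
    if PySem.Chars.startswith (cs.drop k) "P1 ".toList then decide (6 ≤ run)
    else bLoop cs (k + 1) (if PySem.Chars.isdigit cs[k] then run + 1 else 0)
  else false
termination_by cs.length - k

def need_ap1_search_alt (line : String) : Bool :=
  bLoop line.toList 0 0

-- ===== PRECONDITION & SPEC =====
def Spec_need_ap1_search (line : String) (out : Bool) : Prop := out = need_ap1_search_alt line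
instance (line : String) (out : Bool) : Decidable (Spec_need_ap1_search line out) := by unfold Spec_need_ap1_search; infer_instance

-- ===== CLAIM (what is proved, stated in full; the proofs are below) =====
def Claim_equal_need_ap1_search : Prop := ∀ (line : String), Dom_need_ap1_search line → Spec_need_ap1_search line (need_ap1_search line)

-- ===== LEMMAS AND PROOFS =====

-- the trailing digit-run length of the first k characters (the value B's `run` tracks)
def trailRun (p : List Char) : Nat := (p.reverse.takeWhile PySem.Chars.isdigit).length

theorem trailRun_step (cs : List Char) (k : Nat) (hk : k < cs.length) :
    trailRun (cs.take (k + 1)) =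
      if PySem.Chars.isdigit cs[k] then trailRun (cs.take k) + 1 else 0 := by
  unfold trailRun
  have htake : (cs.take (k + 1)).reverse = cs[k] :: (cs.take k).reverse := by
    rw [List.take_add_one, List.getElem?_eq_getElem hk]
    simp
  rw [htake]
  by_cases hd : PySem.Chars.isdigit cs[k]
  · rw [if_pos hd, List.takeWhile_cons_of_pos (by simpa using hd)]
    simp
  · rw [if_neg hd, List.takeWhile_cons_of_neg (by simpa using hd)]
    simp

-- A's backward loop counts the trailing digit run of the first k characters
theorem aLoop_eq (cs : List Char) (k : Nat) (hk : k ≤ cs.length) :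
    aLoop cs ((k : Int) - 1) = (k : Int) - 1 - (trailRun (cs.take k) : Int) := by
  have mred : ∀ (x : Char) (a b : Int),
      (match some x with
        | some c => if PySem.Chars.isdigit c = true then a else b
        | none => b) = if PySem.Chars.isdigit x = true then a else b := fun _ _ _ => rfl
  induction k with
  | zero => rw [aLoop]; simp [trailRun]
  | succ k ih =>
    have hk' : k < cs.length := by omega
    have hget : PySem.List.pyGet? cs ((k + 1 : Nat) - 1 : Int) = some cs[k] := by
      have : ((k + 1 : Nat) : Int) - 1 = ((k : Nat) : Int) := by push_cast; ring
      rw [this, PySem.List.pyGet?_natCast, List.getElem?_eq_getElem hk']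
    have h0 : (0 : Int) ≤ ((k + 1 : Nat) : Int) - 1 := by push_cast; omega
    rw [aLoop, dif_pos h0, hget, mred, trailRun_step cs k hk']
    by_cases hd : PySem.Chars.isdigit cs[k]
    · rw [if_pos hd, if_pos hd]
      have he : ((k + 1 : Nat) : Int) - 1 - 1 = ((k : Nat) : Int) - 1 := by push_cast; ring
      rw [he, ih (by omega)]
      push_cast
      ring
    · rw [if_neg hd, if_neg hd]
      simp

-- B's loop when "P1 " never starts at or after position k
theorem bLoop_no_match (cs : List Char) (k run : Nat)
    (h : ∀ j, k ≤ j → ¬ ("P1 ".toList <+: cs.drop j)) :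
    bLoop cs k run = false := by
  induction hn : cs.length - k generalizing k run with
  | zero => rw [bLoop, dif_neg (by omega)]
  | succ m ih =>
    rw [bLoop, dif_pos (by omega)]
    rw [if_neg (by
      intro hs
      exact h k le_rfl ((PySem.Chars.startswith_iff _ _).mp hs))]
    exact ih _ _ (fun j hj => h j (by omega)) (by omega)

-- B's loop from k with run = trailRun (take k), when the first match at or after k is at n
theorem bLoop_found (cs : List Char) (n k : Nat)
    (hk : k ≤ n)
    (hmatch : "P1 ".toList <+: cs.drop n)
    (hmin : ∀ j, k ≤ j → j < n → ¬ ("P1 ".toList <+: cs.drop j)) :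
    bLoop cs k (trailRun (cs.take k)) = decide (6 ≤ trailRun (cs.take n)) := by
  have hnlt : n < cs.length := by
    have := hmatch.length_le
    simp only [List.length_drop] at this
    have : 3 ≤ cs.length - n := this
    omega
  induction hd : n - k generalizing k with
  | zero =>
    have hkn : k = n := by omega
    subst hkn
    rw [bLoop, dif_pos hnlt, if_pos ((PySem.Chars.startswith_iff _ _).mpr hmatch)]
  | succ m ih =>
    have hklt : k < cs.length := by omega
    rw [bLoop, dif_pos hklt]
    rw [if_neg (by
      intro hs
      exact hmin k le_rfl (by omega) ((PySem.Chars.startswith_iff _ _).mp hs))]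
    rw [← trailRun_step cs k hklt]
    exact ih (k + 1) (by omega) (fun j hj => hmin j (by omega)) (by omega)

-- ===== VERDICT (by name: the statement is the Claim_ definition above) =====
theorem need_ap1_search_spec : Claim_equal_need_ap1_search := by
  intro line _
  unfold Spec_need_ap1_search
  simp only [need_ap1_search, need_ap1_search_alt]
  set cs := line.toList with hcs
  set i := PySem.Chars.find cs "P1 ".toList with hi
  by_cases hfound : 0 ≤ i
  · obtain ⟨hpre, hminp⟩ := PySem.Chars.find_spec (s := cs) (sub := "P1 ".toList) hfound
    set n := i.toNat with hn
    have hin : i = (n : Int) := by omega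
    have hB : bLoop cs 0 0 = decide (6 ≤ trailRun (cs.take n)) := by
      have h0 : trailRun (cs.take 0) = 0 := by simp [trailRun]
      rw [← h0]
      exact bLoop_found cs n 0 (Nat.zero_le n) hpre (fun j _ hj => hminp j hj)
    rw [hB]
    by_cases hlt : i < 1
    · -- i = 0: A returns false; B's run at the match is trailRun(take 0) = 0 < 6
      have hn0 : n = 0 := by omega
      rw [if_pos hlt, hn0]
      simp [trailRun]
    · rw [if_neg hlt]
      have hnlt : n < cs.length := by
        have := hpre.length_le
        simp only [List.length_drop] at this
        have : 3 ≤ cs.length - n := this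
        omega
      have h1n : 1 ≤ n := by omega
      have hn1 : n - 1 < cs.length := by omega
      have hget : PySem.List.pyGet? cs (i - 1) = some cs[n - 1] := by
        have he : i - 1 = ((n - 1 : Nat) : Int) := by omega
        rw [he, PySem.List.pyGet?_natCast, List.getElem?_eq_getElem hn1]
      rw [hget]
      have mred : ∀ (x : Char) (r : Bool),
          (match some x with
            | none => false
            | some c => if (!PySem.Chars.isdigit c) = true then false else r) =
          if (!PySem.Chars.isdigit x) = true then false else r := fun _ _ => rfl
      rw [mred]
      have hloop : aLoop cs (i - 1) = i - 1 - (trailRun (cs.take n) : Int) := by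
        rw [hin]; exact aLoop_eq cs n (by omega)
      have hhead : (cs.take n).reverse.head? = some cs[n - 1] := by
        rw [List.head?_reverse, List.getLast?_eq_getElem?, List.length_take]
        rw [show min n cs.length - 1 = n - 1 by omega]
        rw [List.getElem?_take_of_lt (by omega), List.getElem?_eq_getElem hn1]
      by_cases hd : PySem.Chars.isdigit cs[n - 1]
      · rw [if_neg (by simp [hd]), hloop]
        congr 1
        rw [eq_iff_iff]
        omega
      · rw [if_pos (by simp [hd])]
        have ht0 : trailRun (cs.take n) = 0 := by
          unfold trailRun
          cases hrev : (cs.take n).reverse with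
          | nil => simp
          | cons c cs' =>
            rw [hrev] at hhead
            simp only [List.head?_cons, Option.some.injEq] at hhead
            rw [List.takeWhile_cons_of_neg (by rw [hhead]; simpa using hd)]
            simp
        rw [ht0]
        simp
  · -- not found: i = -1, A returns false; B's scan never matches
    have hi1 : i < 1 := by omega
    rw [if_pos hi1]
    have hnotin : ¬ ("P1 ".toList <:+: cs) := by
      rw [← PySem.Chars.find_nonneg_iff (s := cs) (sub := "P1 ".toList)]
      exact hfound
    rw [bLoop_no_match cs 0 0 (fun j _ hpre =>
      hnotin ((PySem.Chars.isIn_iff_infix _ _).mp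
        ((PySem.Chars.exists_prefix_drop_iff_isIn _ _).mp ⟨j, hpre⟩)))]
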